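-- pv_equiv track=rewrite | github.com/Dormailler/Algorithm | 프로그래머스/unrated/250136. ［PCCP 기출문제］ 2번 ／ 석유 시추/［PCCP 기출문제］ 2번 ／ 석유 시추.py | solution
-- ===== SOURCE A (Python) =====
-- from collections import deque
--
-- def solution(land):
--     answer = 0
--     n = len(land)
--     m = len(land[0])
--     dx = [0,0,1,-1]
--     dy = [1,-1,0,0]
--     k = [0] * m
--     visited = [[0] * m for _ in range(n)]
--     def bfs(a,b,visited,num):
--         queue = deque()
--         queue.append((a,b))
--         visited[a][b] = 1
--         num += 1
--         p = []
--         while queue: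
--             x,y = queue.popleft()
--             if y not in p:
--                 p.append(y)
--             for i in range(4):
--                 nx = x + dx[i]
--                 ny = y + dy[i]
--                 if 0 <= nx < n and 0 <= ny < m and visited[nx][ny] == 0 and land[nx][ny] == 1:
--                     visited[nx][ny] = 1
--                     num += 1
--                     queue.append((nx,ny))
--         for o in p:
--             k[o] += num
--         return num
--     for j in range(m):
--         for i in range(n):
--             num = 0
--             if land[i][j] == 1 and visited[i][j] == 0:
--                 num = bfs(i,j,visited,num)
--     return max(k)
-- ===== SOURCE B (Python) =====
-- def solution(land):
--     # Disjoint-set style component labelling: give every land cell its own label,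
--     # sweep once over right/down edges merging labels, then aggregate per class.
--     n, m = len(land), len(land[0])
--     label = {}
--     for i in range(n):
--         for j in range(m):
--             if land[i][j] == 1:
--                 label[(i, j)] = (i, j)
--     for i in range(n):
--         for j in range(m):
--             if land[i][j] != 1:
--                 continue
--             for (ni, nj) in ((i + 1, j), (i, j + 1)):
--                 if ni < n and nj < m and land[ni][nj] == 1:
--                     ra, rb = label[(i, j)], label[(ni, nj)]
--                     if ra != rb:
--                         label = {c: (ra if r == rb else r) for c, r in label.items()}
--     groups = {}
--     for c, r in label.items():
--         groups.setdefault(r, []).append(c)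
--     k = [0] * m
--     for cells in groups.values():
--         for col in {c for (_, c) in cells}:
--             k[col] += len(cells)
--     return max(k)
-- ===== Notes on version B (the rewrite author's own statement) =====
-- stated objective: alternative
-- what changed: A labels components by per-seed BFS flood fill over a visited matrix (queue + in-order duplicate-checked column list, mutating k inside the search); B instead gives every land cell its own label and makes one sweep over the right/down edges, merging the two labels of an edge by relabelling one class, then aggregates each label class's size over its distinct columns.
import Mathlib
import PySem

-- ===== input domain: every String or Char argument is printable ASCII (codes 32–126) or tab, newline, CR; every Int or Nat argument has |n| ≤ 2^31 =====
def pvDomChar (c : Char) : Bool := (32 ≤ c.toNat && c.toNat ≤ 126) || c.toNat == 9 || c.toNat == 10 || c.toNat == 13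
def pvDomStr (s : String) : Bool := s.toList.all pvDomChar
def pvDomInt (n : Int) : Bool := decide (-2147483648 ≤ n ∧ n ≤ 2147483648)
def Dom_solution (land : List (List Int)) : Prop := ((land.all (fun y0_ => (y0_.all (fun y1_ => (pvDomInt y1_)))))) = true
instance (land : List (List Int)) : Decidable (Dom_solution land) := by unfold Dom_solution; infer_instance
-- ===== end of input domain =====

-- B (solution_alt) replaces A's per-seed BFS flood fill by a disjoint-set style label-merging sweep; return values agree on Pre_.

-- ===== PORT A =====
-- land[i][j] / visited[i][j]: on every admitted input every such access A makes is in range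
-- (0 ≤ i < n, 0 ≤ j < m ≤ row length), so the defaulted read is exact.
def pvGet2 (g : List (List Int)) (i j : Int) : Int :=
  PySem.List.pyGetD (PySem.List.pyGetD g i []) j 0

-- visited[i][j] = v (call sites guarantee 0 ≤ i < len g, 0 ≤ j < len row, so .toNat is exact here)
def pvSet2 (g : List (List Int)) (i j : Int) (v : Int) : List (List Int) :=
  g.set i.toNat ((g.getD i.toNat []).set j.toNat v)

-- k[o] += num (0 ≤ o < m at every call site)
def pvAddAt (k : List Int) (o : Int) (num : Int) : List Int :=
  k.set o.toNat (PySem.List.pyGetD k o 0 + num)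

-- (dx[i], dy[i]) for i in range(4)
def pvDirs : List (Int × Int) := [(0, 1), (0, -1), (1, 0), (-1, 0)]

-- the body of the `for i in range(4)` loop: state = (queue, visited, num)
def pvBfsStep (land : List (List Int)) (n m x y : Int)
    (s : List (Int × Int) × List (List Int) × Int) (d : Int × Int) :
    List (Int × Int) × List (List Int) × Int :=
  let nx := x + d.1
  let ny := y + d.2
  if 0 ≤ nx ∧ nx < n ∧ 0 ≤ ny ∧ ny < m ∧ pvGet2 s.2.1 nx ny = 0 ∧ pvGet2 land nx ny = 1 then
    (s.1 ++ [(nx, ny)], pvSet2 s.2.1 nx ny 1, s.2.2 + 1)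
  else s

-- `while queue:` — fuel-bounded; fuel is never exhausted on admitted inputs (proved below)
def pvBfsLoop (land : List (List Int)) (n m : Int) :
    Nat → List (Int × Int) → List (List Int) → Int → List Int →
    List (List Int) × Int × List Int
  | _, [], visited, num, p => (visited, num, p)
  | 0, _ :: _, visited, num, p => (visited, num, p)
  | fuel + 1, (x, y) :: rest, visited, num, p =>
      let p' := if y ∈ p then p else p ++ [y]
      let s := pvDirs.foldl (pvBfsStep land n m x y) (rest, visited, num)
      pvBfsLoop land n m fuel s.1 s.2.1 s.2.2 p'

-- bfs(a, b, visited, num): returns the new (visited, num, k) (k is a closure variable in A)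
def pvBfs (land : List (List Int)) (n m : Int) (fuel : Nat) (a b : Int)
    (visited : List (List Int)) (num : Int) (k : List Int) :
    List (List Int) × Int × List Int :=
  let visited := pvSet2 visited a b 1
  let num := num + 1
  let r := pvBfsLoop land n m fuel [(a, b)] visited num []
  (r.1, r.2.1, r.2.2.foldl (fun k o => pvAddAt k o r.2.1) k)

def solution (land : List (List Int)) : Int :=
  let n : Int := (land.length : Int)
  let m : Int := ((land.headD []).length : Int)   -- len(land[0]); Pre_ gives land ≠ []
  let fuel : Nat := land.length * (land.headD []).length + 1
  let visited0 : List (List Int) :=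
    List.replicate land.length (List.replicate (land.headD []).length 0)
  let k0 : List Int := List.replicate (land.headD []).length (0 : Int)
  let fin :=
    (PySem.List.pyRange 0 m 1).foldl (fun st j =>
      (PySem.List.pyRange 0 n 1).foldl (fun st i =>
        if pvGet2 land i j = 1 ∧ pvGet2 st.1 i j = 0 then
          let r := pvBfs land n m fuel i j st.1 0 st.2
          (r.1, r.2.2)
        else st) st) (visited0, k0)
  (PySem.List.max? fin.2 (fun x => x)).getD 0   -- max(k); Pre_ gives m ≥ 1, so k ≠ [] and max? is some

-- ===== PORT B =====
-- label[(i,j)] lookups in B never miss (both cells were initialised), so the defaulted read is exact.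
def pvLookup (lab : PySem.Dict (Int × Int) (Int × Int)) (c : Int × Int) : Int × Int :=
  lab.getD c (0, 0)

-- the merge of one edge: body of the `for (ni, nj) in ((i+1,j),(i,j+1))` loop
def pvMerge (land : List (List Int)) (n m : Int) (c : Int × Int)
    (lab : PySem.Dict (Int × Int) (Int × Int)) (nb : Int × Int) :
    PySem.Dict (Int × Int) (Int × Int) :=
  if nb.1 < n ∧ nb.2 < m ∧ pvGet2 land nb.1 nb.2 = 1 then
    let ra := pvLookup lab c
    let rb := pvLookup lab nb
    if ra ≠ rb then
      PySem.Dict.mk (lab.items.map (fun cr => (cr.1, if cr.2 = rb then ra else cr.2)))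
    else lab
  else lab

def solution_alt (land : List (List Int)) : Int :=
  let n : Int := (land.length : Int)
  let m : Int := ((land.headD []).length : Int)
  let label0 : PySem.Dict (Int × Int) (Int × Int) :=
    (PySem.List.pyRange 0 n 1).foldl (fun d i =>
      (PySem.List.pyRange 0 m 1).foldl (fun d j =>
        if pvGet2 land i j = 1 then d.insert (i, j) (i, j) else d) d) PySem.Dict.empty
  let label :=
    (PySem.List.pyRange 0 n 1).foldl (fun lab i =>
      (PySem.List.pyRange 0 m 1).foldl (fun lab j =>
        if pvGet2 land i j ≠ 1 then lab
        else [((i + 1 : Int), j), (i, (j + 1 : Int))].foldl (pvMerge land n m (i, j)) lab) lab) label0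
  let groups : PySem.Dict (Int × Int) (List (Int × Int)) :=
    label.items.foldl (fun g cr => g.modify cr.2 [] (· ++ [cr.1])) PySem.Dict.empty
  let k0 : List Int := List.replicate (land.headD []).length (0 : Int)
  let k :=
    groups.values.foldl (fun k cells =>
      (PySem.Set.ofList (cells.map (·.2))).foldl (fun k col =>
        pvAddAt k col (cells.length : Int)) k) k0
  (PySem.List.max? k (fun x => x)).getD 0

-- ===== PRECONDITION & SPEC =====
-- Pre_ excludes exactly the inputs where A raises: the empty grid / an empty first row
-- (max() of an empty k, IndexError on land[0]) and grids with a row shorter than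
-- len(land[0]) (IndexError on land[i][j]).
def Pre_solution (land : List (List Int)) : Prop :=
  land ≠ [] ∧ 0 < (land.headD []).length ∧ ∀ r ∈ land, (land.headD []).length ≤ r.length

instance (land : List (List Int)) : Decidable (Pre_solution land) := by
  unfold Pre_solution; infer_instance

def pvWitness_solution : List (List Int) := [[1, 0, 1], [0, 1, 1]]

def Spec_solution (land : List (List Int)) (out : Int) : Prop := out = solution_alt land
instance (land : List (List Int)) (out : Int) : Decidable (Spec_solution land out) := by
  unfold Spec_solution; infer_instance

-- ===== CLAIM (what is proved, stated in full; the proofs are below) =====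
def Claim_equal_solution : Prop :=
  ∀ (land : List (List Int)), Dom_solution land → Pre_solution land →
    Spec_solution land (solution land)

-- ===== LEMMAS AND PROOFS =====

-- ---- the common specification layer: the grid graph and its components ----

def pvN (land : List (List Int)) : Nat := land.length
def pvM (land : List (List Int)) : Nat := (land.headD []).length

def pvLandB (land : List (List Int)) (c : Int × Int) : Bool :=
  decide (0 ≤ c.1 ∧ c.1 < (pvN land : Int) ∧ 0 ≤ c.2 ∧ c.2 < (pvM land : Int) ∧
    pvGet2 land c.1 c.2 = 1)

def pvAdj (land : List (List Int)) (c d : Int × Int) : Prop :=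
  pvLandB land c = true ∧ pvLandB land d = true ∧
    (c.1 - d.1).natAbs + (c.2 - d.2).natAbs = 1

def pvConn (land : List (List Int)) : Int × Int → Int × Int → Prop :=
  Relation.ReflTransGen (pvAdj land)

def pvCellsF (land : List (List Int)) : Finset (Int × Int) :=
  (((Finset.range (pvN land)) ×ˢ (Finset.range (pvM land))).image
    (fun p => ((p.1 : Int), (p.2 : Int)))).filter (fun c => pvLandB land c = true)

noncomputable def pvComp (land : List (List Int)) (c : Int × Int) : Finset (Int × Int) :=
  @Finset.filter _ (fun d => pvConn land c d) (fun d => Classical.propDecidable _) (pvCellsF land)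

noncomputable def pvComps (land : List (List Int)) : Finset (Finset (Int × Int)) :=
  (pvCellsF land).image (pvComp land)

def pvContrib (C : Finset (Int × Int)) (col : Int) : Int :=
  if ∃ x ∈ C, x.2 = col then (C.card : Int) else 0

noncomputable def pvKSpec (land : List (List Int)) (col : Int) : Int :=
  ∑ C ∈ pvComps land, pvContrib C col

def pvGridOf (land : List (List Int)) (S : Finset (Int × Int)) : List (List Int) :=
  (List.range (pvN land)).map (fun (i : Nat) =>
    (List.range (pvM land)).map (fun (j : Nat) => if ((i : Int), (j : Int)) ∈ S then (1 : Int) else 0))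

-- the scan orders of the two programs, flattened
def pvPairsCM (land : List (List Int)) : List (Int × Int) :=
  (List.range (pvM land)).flatMap (fun (j : Nat) =>
    (List.range (pvN land)).map (fun (i : Nat) => ((i : Int), (j : Int))))

def pvPairsRM (land : List (List Int)) : List (Int × Int) :=
  (List.range (pvN land)).flatMap (fun (i : Nat) =>
    (List.range (pvM land)).map (fun (j : Nat) => ((i : Int), (j : Int))))

def pvCellsRM (land : List (List Int)) : List (Int × Int) :=
  (pvPairsRM land).filter (fun c => pvLandB land c)

-- components already discovered after the cells of P have been scanned
noncomputable def pvDiscovered (land : List (List Int)) (P : List (Int × Int)) :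
    Finset (Finset (Int × Int)) :=
  @Finset.filter _ (fun C => ∃ c ∈ C, c ∈ P) (fun _ => Classical.propDecidable _) (pvComps land)

noncomputable def pvDisc (land : List (List Int)) (P : List (Int × Int)) : Finset (Int × Int) :=
  (pvDiscovered land P).sup id

-- ---- basic facts ----

lemma pvLandB_iff (land : List (List Int)) (c : Int × Int) :
    pvLandB land c = true ↔
      0 ≤ c.1 ∧ c.1 < (pvN land : Int) ∧ 0 ≤ c.2 ∧ c.2 < (pvM land : Int) ∧
        pvGet2 land c.1 c.2 = 1 := by
  simp [pvLandB]

lemma mem_pvCellsF (land : List (List Int)) (c : Int × Int) :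
    c ∈ pvCellsF land ↔ pvLandB land c = true := by
  constructor
  · intro h; exact (Finset.mem_filter.mp h).2
  · intro h
    refine Finset.mem_filter.mpr ⟨?_, h⟩
    rw [pvLandB_iff] at h
    refine Finset.mem_image.mpr ⟨(c.1.toNat, c.2.toNat), ?_, ?_⟩
    · rw [Finset.mem_product]; constructor <;> rw [Finset.mem_range] <;> omega
    · rcases c with ⟨a, b⟩; simp only [Prod.ext_iff]; constructor <;> simp <;> omega

lemma pvCellsF_card_le (land : List (List Int)) :
    (pvCellsF land).card ≤ pvN land * pvM land := by
  calc (pvCellsF land).card ≤ (((Finset.range (pvN land)) ×ˢ (Finset.range (pvM land))).image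
      (fun p : Nat × Nat => ((p.1 : Int), (p.2 : Int)))).card := Finset.card_filter_le _ _
    _ ≤ ((Finset.range (pvN land)) ×ˢ (Finset.range (pvM land))).card := Finset.card_image_le
    _ = pvN land * pvM land := by rw [Finset.card_product, Finset.card_range, Finset.card_range]

lemma pvAdj_symm (land : List (List Int)) : Symmetric (pvAdj land) := by
  intro c d h
  obtain ⟨h1, h2, h3⟩ := h
  refine ⟨h2, h1, ?_⟩
  omega

lemma pvConn_symm {land : List (List Int)} {c d : Int × Int} (h : pvConn land c d) :
    pvConn land d c :=
  Relation.ReflTransGen.symmetric (pvAdj_symm land) h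

lemma pvAdj_cases {c d : Int × Int} (h : (c.1 - d.1).natAbs + (c.2 - d.2).natAbs = 1) :
    d = (c.1, c.2 + 1) ∨ d = (c.1, c.2 - 1) ∨ d = (c.1 + 1, c.2) ∨ d = (c.1 - 1, c.2) := by
  rcases c with ⟨a, b⟩; rcases d with ⟨e, f⟩
  simp only [Prod.mk.injEq] at *
  omega

lemma mem_pvComp (land : List (List Int)) (c d : Int × Int) :
    d ∈ pvComp land c ↔ pvLandB land d = true ∧ pvConn land c d := by
  simp only [pvComp, Finset.mem_filter, mem_pvCellsF]

lemma self_mem_pvComp (land : List (List Int)) (c : Int × Int) (h : pvLandB land c = true) :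
    c ∈ pvComp land c := by
  exact (mem_pvComp land c c).mpr ⟨h, Relation.ReflTransGen.refl⟩

lemma pvComp_eq_of_conn (land : List (List Int)) {c d : Int × Int}
    (h : pvConn land c d) : pvComp land c = pvComp land d := by
  ext e
  rw [mem_pvComp, mem_pvComp]
  constructor
  · rintro ⟨hl, hc⟩; exact ⟨hl, Relation.ReflTransGen.trans (pvConn_symm h) hc⟩
  · rintro ⟨hl, hc⟩; exact ⟨hl, Relation.ReflTransGen.trans h hc⟩

-- a component equals the component of any of its members
lemma pvComp_eq_of_mem (land : List (List Int)) {C : Finset (Int × Int)} {d : Int × Int}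
    (hC : C ∈ pvComps land) (hd : d ∈ C) : C = pvComp land d := by
  rw [pvComps, Finset.mem_image] at hC
  obtain ⟨c, hc, rfl⟩ := hC
  exact pvComp_eq_of_conn land ((mem_pvComp land c d).mp hd).2

lemma pvComp_closed (land : List (List Int)) {c d e : Int × Int}
    (hd : d ∈ pvComp land c) (he : pvAdj land d e) : e ∈ pvComp land c := by
  rw [mem_pvComp] at *
  exact ⟨he.2.1, Relation.ReflTransGen.tail hd.2 he⟩

lemma pvComp_conn (land : List (List Int)) {s c d : Int × Int}
    (hc : c ∈ pvComp land s) (hd : d ∈ pvComp land s) : pvConn land c d := by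
  rw [mem_pvComp] at *
  exact Relation.ReflTransGen.trans (pvConn_symm hc.2) hd.2

-- ---- grid-of-set reads and writes ----

lemma pvGetElem_map_range {β : Type} (n : Nat) (f : Nat → β) (a : Nat)
    (h2 : a < ((List.range n).map f).length) : ((List.range n).map f)[a] = f a := by
  rw [List.getElem_map, List.getElem_range]

lemma pvGetD_map_range {β : Type} (n : Nat) (f : Nat → β) (d : β) (k : Nat) :
    ((List.range n).map f).getD k d = if k < n then f k else d := by
  by_cases h : k < n
  · rw [List.getD_eq_getElem _ _ (by simpa using h), pvGetElem_map_range, if_pos h]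
  · rw [List.getD_eq_default _ _ (by simpa using h), if_neg h]

lemma pvGet2_gridOf (land : List (List Int)) (S : Finset (Int × Int)) {i j : Int}
    (hi0 : 0 ≤ i) (hin : i < (pvN land : Int)) (hj0 : 0 ≤ j) (hjm : j < (pvM land : Int)) :
    pvGet2 (pvGridOf land S) i j = if (i, j) ∈ S then 1 else 0 := by
  have hi' : i.toNat < pvN land := by omega
  have hj' : j.toNat < pvM land := by omega
  rw [pvGet2, PySem.List.pyGetD_of_nonneg _ _ hi0, pvGridOf]
  rw [pvGetD_map_range, if_pos hi']
  rw [PySem.List.pyGetD_of_nonneg _ _ hj0]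
  rw [pvGetD_map_range, if_pos hj']
  rw [Int.toNat_of_nonneg hi0, Int.toNat_of_nonneg hj0]

lemma pvSet_map_range {β : Type} (n : Nat) (f : Nat → β) (a : Nat) (v : β) :
    ((List.range n).map f).set a v = (List.range n).map (fun k => if k = a then v else f k) := by
  apply List.ext_getElem
  · simp
  intro b h1 h2
  simp only [List.length_set, List.length_map, List.length_range] at h1 h2
  rw [List.getElem_set, pvGetElem_map_range, pvGetElem_map_range]
  split_ifs with e1 e2 e3 <;> first | rfl | omega

lemma pvSet2_gridOf (land : List (List Int)) (S : Finset (Int × Int)) {i j : Int}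
    (hi0 : 0 ≤ i) (hin : i < (pvN land : Int)) (hj0 : 0 ≤ j) (hjm : j < (pvM land : Int)) :
    pvSet2 (pvGridOf land S) i j 1 = pvGridOf land (insert (i, j) S) := by
  have hi' : i.toNat < pvN land := by omega
  have hj' : j.toNat < pvM land := by omega
  rw [pvSet2, pvGridOf, pvGridOf, pvGetD_map_range, if_pos hi', pvSet_map_range,
    pvSet_map_range]
  apply List.map_congr_left
  intro a ha
  by_cases hcase : a = i.toNat
  · subst hcase
    rw [if_pos rfl]
    apply List.map_congr_left
    intro b hb
    rw [List.mem_range] at hb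
    by_cases hb2 : b = j.toNat
    · rw [if_pos hb2]
      have h3 : ((i.toNat : Int), (b : Int)) = (i, j) := by
        rw [Prod.ext_iff]; constructor <;> simp <;> omega
      rw [h3, if_pos (Finset.mem_insert_self _ _)]
    · have h3 : ¬ (((i.toNat : Int), (b : Int)) = (i, j)) := by
        intro h; rw [Prod.ext_iff] at h; obtain ⟨h4, h5⟩ := h; simp at h4 h5; omega
      have hiff : (((i.toNat : Int)), (b : Int)) ∈ insert (i, j) S ↔
          (((i.toNat : Int)), (b : Int)) ∈ S := by
        rw [Finset.mem_insert]; exact or_iff_right h3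
      rw [if_neg hb2]
      simp only [hiff]
  · rw [if_neg hcase]
    apply List.map_congr_left
    intro b hb
    rw [List.mem_range] at ha
    have h3 : ¬ (((a : Int), (b : Int)) = (i, j)) := by
      intro h; rw [Prod.ext_iff] at h; obtain ⟨h4, h5⟩ := h; simp at h4 h5; omega
    have hiff : ((a : Int), (b : Int)) ∈ insert (i, j) S ↔ ((a : Int), (b : Int)) ∈ S := by
      rw [Finset.mem_insert]; exact or_iff_right h3
    simp only [hiff]

lemma pvGridOf_empty (land : List (List Int)) :
    List.replicate land.length (List.replicate (land.headD []).length (0 : Int))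
      = pvGridOf land (∅ : Finset (Int × Int)) := by
  rw [pvGridOf]
  simp [List.map_const', pvN, pvM]

-- ---- the k[o] += num loop ----

lemma pvGetD_set (l : List Int) (i j : Nat) (v d : Int) :
    (l.set i v).getD j d = if i = j ∧ i < l.length then v else l.getD j d := by
  rcases Nat.lt_or_ge j l.length with h | h
  · rw [List.getD_eq_getElem _ _ (by simpa using h), List.getD_eq_getElem _ _ h, List.getElem_set]
    split_ifs with h1 h2 h3 <;> try rfl
    · omega
    · omega
  · rw [List.getD_eq_default _ _ (by simpa using h), List.getD_eq_default _ _ h]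
    split_ifs with h1 <;> [omega; rfl]

lemma pvFoldAdd (num : Int) (p : List Int) : ∀ (k : List Int), p.Nodup →
    (∀ o ∈ p, 0 ≤ o ∧ o < (k.length : Int)) →
    (p.foldl (fun k o => pvAddAt k o num) k).length = k.length ∧
      ∀ (col : Nat), (p.foldl (fun k o => pvAddAt k o num) k).getD col 0 =
        k.getD col 0 + (if ((col : Int) ∈ p ∧ col < k.length) then num else 0) := by
  induction p with
  | nil => intro k _ _; simp
  | cons o t ih =>
    intro k hnd hbd
    obtain ⟨ho0, hol⟩ := hbd o (List.mem_cons_self ..)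
    have hlen : (pvAddAt k o num).length = k.length := by simp [pvAddAt]
    obtain ⟨ih1, ih2⟩ := ih (pvAddAt k o num) hnd.of_cons (by rw [hlen]; intro x hx; exact hbd x (List.mem_cons_of_mem _ hx))
    simp only [List.foldl_cons]
    refine ⟨by rw [ih1, hlen], ?_⟩
    intro col
    rw [ih2 col, hlen]
    have hnotin : o ∉ t := (List.nodup_cons.mp hnd).1
    rw [pvAddAt, pvGetD_set, PySem.List.pyGetD_of_nonneg _ _ ho0]
    have htn : (o.toNat : Int) = o := Int.toNat_of_nonneg ho0
    by_cases hc : o.toNat = col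
    · subst hc
      rw [if_pos ⟨rfl, by omega⟩]
      rw [if_neg (by rw [htn]; intro h; exact hnotin h.1)]
      rw [if_pos ⟨by rw [htn]; exact List.mem_cons_self .., by omega⟩]
      ring
    · rw [if_neg (by intro h; exact hc h.1)]
      have hne : ¬ ((col : Int) = o) := by omega
      simp only [List.mem_cons, hne, false_or]

-- ---- the BFS loop of A computes the component of its seed ----

lemma pvDirsFold_spec (land : List (List Int)) (C S : Finset (Int × Int))
    (hCland : ∀ c ∈ C, pvLandB land c = true)
    (hCclosed : ∀ c ∈ C, ∀ d, pvAdj land c d → d ∈ C)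
    (hCS : ∀ c ∈ C, c ∉ S)
    (x y : Int) (hxy : (x, y) ∈ C) :
    ∀ (ds : List (Int × Int)), (∀ d ∈ ds, d.1.natAbs + d.2.natAbs = 1) →
    ∀ (q : List (Int × Int)) (W : Finset (Int × Int)), W ⊆ C →
      ∃ new : List (Int × Int),
        ds.foldl (pvBfsStep land (pvN land : Int) (pvM land : Int) x y)
            (q, pvGridOf land (S ∪ W), (W.card : Int))
          = (q ++ new, pvGridOf land (S ∪ (W ∪ new.toFinset)),
              ((W ∪ new.toFinset).card : Int))
        ∧ new.Nodup ∧ (∀ t ∈ new, t ∈ C ∧ t ∉ W)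
        ∧ (∀ d ∈ ds, ∀ t : Int × Int, t = (x + d.1, y + d.2) →
            pvLandB land t = true → t ∈ W ∨ t ∈ new) := by
  intro ds
  induction ds with
  | nil =>
    intro _ q W hW
    exact ⟨[], by simp, by simp, by simp, by simp⟩
  | cons d ds ih =>
    intro hd q W hW
    have hd1 : d.1.natAbs + d.2.natAbs = 1 := hd d (List.mem_cons_self ..)
    have hdtl : ∀ d' ∈ ds, d'.1.natAbs + d'.2.natAbs = 1 :=
      fun d' h' => hd d' (List.mem_cons_of_mem _ h')
    rw [List.foldl_cons]
    set t : Int × Int := (x + d.1, y + d.2) with ht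
    have hland_xy : pvLandB land (x, y) = true := hCland _ hxy
    have hadj_t : pvLandB land t = true → pvAdj land (x, y) t := by
      intro hl
      refine ⟨hland_xy, hl, ?_⟩
      simp only [ht]
      omega
    have htC : pvLandB land t = true → t ∈ C := by
      intro hl
      exact hCclosed _ hxy _ (hadj_t hl)
    by_cases hcond : pvLandB land t = true ∧ t ∉ W
    · -- the neighbour is a fresh component cell: it is enqueued and marked
      obtain ⟨hlt, htW⟩ := hcond
      have htS : t ∉ S := hCS _ (htC hlt)
      have hbnds := (pvLandB_iff land t).mp hlt
      have hstep : pvBfsStep land (pvN land : Int) (pvM land : Int) x y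
          (q, pvGridOf land (S ∪ W), (W.card : Int)) d
          = (q ++ [t], pvGridOf land (S ∪ insert t W), ((insert t W).card : Int)) := by
        rw [pvBfsStep]
        simp only
        rw [pvGet2_gridOf land (S ∪ W) hbnds.1 hbnds.2.1 hbnds.2.2.1 hbnds.2.2.2.1]
        rw [if_pos]
        · have h1 : pvSet2 (pvGridOf land (S ∪ W)) (x + d.1) (y + d.2) 1
              = pvGridOf land (S ∪ insert t W) := by
            rw [pvSet2_gridOf land (S ∪ W) hbnds.1 hbnds.2.1 hbnds.2.2.1 hbnds.2.2.2.1]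
            rw [Finset.union_insert]
          have h2 : ((W.card : Int) + 1) = ((insert t W).card : Int) := by
            rw [Finset.card_insert_of_notMem htW]
            push_cast
            ring
          rw [ht] at h1 ⊢
          rw [h1, h2]
        · refine ⟨hbnds.1, hbnds.2.1, hbnds.2.2.1, hbnds.2.2.2.1, ?_, hbnds.2.2.2.2⟩
          rw [if_neg]
          simp only [Finset.mem_union]
          push Not
          exact ⟨htS, htW⟩
      rw [hstep]
      obtain ⟨new', heq, hnd', hmem', hcov'⟩ :=
        ih hdtl (q ++ [t]) (insert t W) (Finset.insert_subset (htC hlt) hW)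
      refine ⟨t :: new', ?_, ?_, ?_, ?_⟩
      · have hset : insert t W ∪ new'.toFinset = W ∪ (t :: new').toFinset := by
          ext z
          simp only [Finset.mem_union, Finset.mem_insert, List.toFinset_cons,
            List.mem_toFinset]
          tauto
        rw [heq, hset]
        simp
      · rw [List.nodup_cons]
        refine ⟨fun hmem => ?_, hnd'⟩
        exact (hmem' t hmem).2 (Finset.mem_insert_self _ _)
      · intro t' ht'
        rcases List.mem_cons.mp ht' with rfl | ht'
        · exact ⟨htC hlt, htW⟩
        · obtain ⟨h1, h2⟩ := hmem' t' ht'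
          exact ⟨h1, fun hc => h2 (Finset.mem_insert_of_mem hc)⟩
      · intro d' hd' t' ht' hlt'
        rcases List.mem_cons.mp hd' with rfl | hd'
        · right; rw [ht']; exact List.mem_cons_self ..
        · rcases hcov' d' hd' t' ht' hlt' with h | h
          · rcases Finset.mem_insert.mp h with h | h
            · right; rw [h]; exact List.mem_cons_self ..
            · left; exact h
          · right; exact List.mem_cons_of_mem _ h
    · -- nothing happens for this neighbour
      have hstep : pvBfsStep land (pvN land : Int) (pvM land : Int) x y
          (q, pvGridOf land (S ∪ W), (W.card : Int)) d
          = (q, pvGridOf land (S ∪ W), (W.card : Int)) := by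
        rw [pvBfsStep]
        simp only
        rw [if_neg]
        intro hcontr
        obtain ⟨h1, h2, h3, h4, h5, h6⟩ := hcontr
        have hlt : pvLandB land t = true := by
          rw [pvLandB_iff]
          exact ⟨h1, h2, h3, h4, h6⟩
        have h5' := h5
        rw [pvGet2_gridOf land (S ∪ W) h1 h2 h3 h4] at h5'
        have htSW : t ∉ S ∪ W := by
          intro hmem
          rw [if_pos hmem] at h5'
          omega
        exact hcond ⟨hlt, fun hw => htSW (Finset.mem_union_right _ hw)⟩
      rw [hstep]
      obtain ⟨new, heq, hnd, hmem, hcov⟩ := ih hdtl q W hW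
      refine ⟨new, heq, hnd, hmem, ?_⟩
      intro d' hd' t' ht' hlt'
      rcases List.mem_cons.mp hd' with rfl | hd'
      · -- the head direction: its target must already be visited (and not in S)
        left
        have ht'' : t' = t := by rw [ht', ht]
        subst ht''
        by_contra htW
        exact hcond ⟨hlt', htW⟩
      · exact hcov d' hd' t' ht' hlt' 

lemma pvBfsLoop_spec (land : List (List Int)) (C S : Finset (Int × Int))
    (hCland : ∀ c ∈ C, pvLandB land c = true)
    (hCclosed : ∀ c ∈ C, ∀ d, pvAdj land c d → d ∈ C)
    (hCconn : ∀ c ∈ C, ∀ d ∈ C, pvConn land c d)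
    (hCS : ∀ c ∈ C, c ∉ S) :
    ∀ (fuel : Nat) (Q : List (Int × Int)) (W : Finset (Int × Int)) (p : List Int),
      W.Nonempty → W ⊆ C → Q.Nodup → (∀ q ∈ Q, q ∈ W) →
      (∀ w ∈ W, w ∉ Q → ∀ d, pvAdj land w d → d ∈ W) →
      p.Nodup → (∀ col, col ∈ p ↔ ∃ w ∈ W, w ∉ Q ∧ w.2 = col) →
      C.card - W.card + Q.length ≤ fuel →
      ∃ p', pvBfsLoop land (pvN land : Int) (pvM land : Int) fuel Q
              (pvGridOf land (S ∪ W)) (W.card : Int) p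
            = (pvGridOf land (S ∪ C), (C.card : Int), p')
        ∧ p'.Nodup ∧ (∀ col, col ∈ p' ↔ ∃ c ∈ C, c.2 = col) := by
  intro fuel
  induction fuel with
  | zero =>
    intro Q W p hWne hWC hQnd hQW hcl hpnd hpmem hfuel
    match Q, hfuel with
    | [], _ =>
      -- queue empty: the marked set is already the whole component
      have hWeqC : W = C := by
        apply Finset.Subset.antisymm hWC
        obtain ⟨a, ha⟩ := hWne
        intro c hc
        have hconn : pvConn land a c := hCconn a (hWC ha) c hc
        clear hc
        induction hconn with
        | refl => exact ha
        | tail hconn hadj ih => exact hcl _ ih (by simp) _ hadj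
      refine ⟨p, ?_, hpnd, ?_⟩
      · rw [pvBfsLoop, hWeqC]
      · intro col
        rw [hpmem col, hWeqC]
        simp
    | (x, y) :: rest, hfuel => simp at hfuel
  | succ fuel ih =>
    intro Q W p hWne hWC hQnd hQW hcl hpnd hpmem hfuel
    match Q, hQnd, hQW, hcl, hpmem, hfuel with
    | [], _, _, hcl, hpmem, _ =>
      have hWeqC : W = C := by
        apply Finset.Subset.antisymm hWC
        obtain ⟨a, ha⟩ := hWne
        intro c hc
        have hconn : pvConn land a c := hCconn a (hWC ha) c hc
        clear hc
        induction hconn with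
        | refl => exact ha
        | tail hconn hadj ih => exact hcl _ ih (by simp) _ hadj
      refine ⟨p, ?_, hpnd, ?_⟩
      · rw [pvBfsLoop, hWeqC]
      · intro col
        rw [hpmem col, hWeqC]
        simp
    | (x, y) :: rest, hQnd, hQW, hcl, hpmem, hfuel =>
      have hxyW : (x, y) ∈ W := hQW _ (List.mem_cons_self ..)
      have hxyC : (x, y) ∈ C := hWC hxyW
      have hdirs : ∀ d ∈ pvDirs, d.1.natAbs + d.2.natAbs = 1 := by
        intro d hd
        fin_cases hd <;> rfl
      obtain ⟨new, heq, hnewnd, hnewmem, hcov⟩ :=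
        pvDirsFold_spec land C S hCland hCclosed hCS x y hxyC pvDirs hdirs rest W hWC
      have hrestW : ∀ q ∈ rest, q ∈ W := fun q hq => hQW q (List.mem_cons_of_mem _ hq)
      have hxy_rest : (x, y) ∉ rest := (List.nodup_cons.mp hQnd).1
      have hnew_notW : ∀ t ∈ new, t ∉ W := fun t ht => (hnewmem t ht).2
      have hnew_C : ∀ t ∈ new, t ∈ C := fun t ht => (hnewmem t ht).1
      have hstep : pvBfsLoop land (pvN land : Int) (pvM land : Int) (fuel + 1)
          ((x, y) :: rest) (pvGridOf land (S ∪ W)) (W.card : Int) p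
          = pvBfsLoop land (pvN land : Int) (pvM land : Int) fuel (rest ++ new)
            (pvGridOf land (S ∪ (W ∪ new.toFinset))) (((W ∪ new.toFinset).card : Int))
            (if y ∈ p then p else p ++ [y]) := by
        rw [pvBfsLoop]
        simp only [heq]
      rw [hstep]
      -- re-establish the invariants for the recursive call
      have hWC1 : W ∪ new.toFinset ⊆ C := by
        intro z hz
        rcases Finset.mem_union.mp hz with hz | hz
        · exact hWC hz
        · exact hnew_C z (List.mem_toFinset.mp hz)
      have hdisj : ∀ a ∈ rest, a ∉ new := fun a ha hb => hnew_notW a hb (hrestW a ha)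
      have hQ1nd : (rest ++ new).Nodup :=
        List.Nodup.append (List.nodup_cons.mp hQnd).2 hnewnd (List.disjoint_left.mpr hdisj)
      have hQ1W : ∀ q ∈ rest ++ new, q ∈ W ∪ new.toFinset := by
        intro q hq
        rcases List.mem_append.mp hq with hq | hq
        · exact Finset.mem_union_left _ (hrestW q hq)
        · exact Finset.mem_union_right _ (List.mem_toFinset.mpr hq)
      have hxy_new : (x, y) ∉ new := fun hc => hnew_notW _ hc hxyW
      have hcl1 : ∀ w ∈ W ∪ new.toFinset, w ∉ rest ++ new →
          ∀ d, pvAdj land w d → d ∈ W ∪ new.toFinset := by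
        intro w hw hwQ d hadj
        rw [List.mem_append] at hwQ
        push Not at hwQ
        rcases Finset.mem_union.mp hw with hw | hw
        · by_cases hwxy : w = (x, y)
          · subst hwxy
            -- d is one of the four neighbours of (x, y); the fold covered them all
            rcases pvAdj_cases hadj.2.2 with hd | hd | hd | hd
            · rcases hcov (0, 1) (by simp [pvDirs]) d (by rw [hd]; simp [Prod.ext_iff, sub_eq_add_neg]) hadj.2.1 with h | h
              · exact Finset.mem_union_left _ h
              · exact Finset.mem_union_right _ (List.mem_toFinset.mpr h)
            · rcases hcov (0, -1) (by simp [pvDirs]) d (by rw [hd]; simp [Prod.ext_iff, sub_eq_add_neg]) hadj.2.1 with h | h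
              · exact Finset.mem_union_left _ h
              · exact Finset.mem_union_right _ (List.mem_toFinset.mpr h)
            · rcases hcov (1, 0) (by simp [pvDirs]) d (by rw [hd]; simp [Prod.ext_iff, sub_eq_add_neg]) hadj.2.1 with h | h
              · exact Finset.mem_union_left _ h
              · exact Finset.mem_union_right _ (List.mem_toFinset.mpr h)
            · rcases hcov (-1, 0) (by simp [pvDirs]) d (by rw [hd]; simp [Prod.ext_iff, sub_eq_add_neg]) hadj.2.1 with h | h
              · exact Finset.mem_union_left _ h
              · exact Finset.mem_union_right _ (List.mem_toFinset.mpr h)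
          · have hwQ' : w ∉ (x, y) :: rest := by
              intro hc
              rcases List.mem_cons.mp hc with hc | hc
              · exact hwxy hc
              · exact hwQ.1 hc
            exact Finset.mem_union_left _ (hcl w hw hwQ' d hadj)
        · exact absurd (List.mem_toFinset.mp hw) hwQ.2
      have hp1nd : (if y ∈ p then p else p ++ [y]).Nodup := by
        split_ifs with hyp
        · exact hpnd
        · exact List.Nodup.append hpnd (List.nodup_singleton y)
            (by simp [List.disjoint_left, hyp])
      have hp1mem : ∀ col, col ∈ (if y ∈ p then p else p ++ [y]) ↔
          ∃ w ∈ W ∪ new.toFinset, w ∉ rest ++ new ∧ w.2 = col := by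
        intro col
        have hmemiff : col ∈ (if y ∈ p then p else p ++ [y]) ↔ col ∈ p ∨ col = y := by
          split_ifs with hyp
          · simp only [iff_self_or]
            intro h; subst h; exact hyp
          · simp [List.mem_append]
        rw [hmemiff]
        constructor
        · rintro (hc | hcol)
          · obtain ⟨w, hwW, hwQ, hwcol⟩ := (hpmem col).mp hc
            refine ⟨w, Finset.mem_union_left _ hwW, ?_, hwcol⟩
            rw [List.mem_append]
            push Not
            exact ⟨fun hr => hwQ (List.mem_cons_of_mem _ hr),
              fun hn => hnew_notW w hn hwW⟩
          · refine ⟨(x, y), Finset.mem_union_left _ hxyW, ?_, hcol.symm⟩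
            rw [List.mem_append]
            push Not
            exact ⟨hxy_rest, hxy_new⟩
        · rintro ⟨w, hwW, hwQ, hwcol⟩
          rw [List.mem_append] at hwQ
          push Not at hwQ
          rcases Finset.mem_union.mp hwW with hw | hw
          · by_cases hwxy : w = (x, y)
            · right; rw [← hwcol, hwxy]
            · left
              apply (hpmem col).mpr
              refine ⟨w, hw, ?_, hwcol⟩
              intro hc
              rcases List.mem_cons.mp hc with hc | hc
              · exact hwxy hc
              · exact hwQ.1 hc
          · exact absurd (List.mem_toFinset.mp hw) hwQ.2
      have hcard1 : (W ∪ new.toFinset).card = W.card + new.length := by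
        rw [Finset.card_union_of_disjoint]
        · rw [List.toFinset_card_of_nodup hnewnd]
        · rw [Finset.disjoint_left]
          intro a ha hb
          exact hnew_notW a (List.mem_toFinset.mp hb) ha
      have hfuel1 : C.card - (W ∪ new.toFinset).card + (rest ++ new).length ≤ fuel := by
        have h1 : (W ∪ new.toFinset).card ≤ C.card := Finset.card_le_card hWC1
        have h2 : W.card ≤ C.card := Finset.card_le_card hWC
        rw [List.length_append, hcard1]
        simp only [List.length_cons] at hfuel
        omega
      exact ih (rest ++ new) (W ∪ new.toFinset) (if y ∈ p then p else p ++ [y])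
        ⟨(x, y), Finset.mem_union_left _ hxyW⟩ hWC1 hQ1nd hQ1W hcl1 hp1nd hp1mem hfuel1

-- ---- generic prefix-indexed fold invariant ----

lemma pvFoldlInv {σ α : Type} (f : σ → α → σ) (Inv : List α → σ → Prop) (l : List α)
    (step : ∀ (P : List α) (a : α) (s : σ), a ∈ l → Inv P s → Inv (P ++ [a]) (f s a)) :
    ∀ (P : List α) (s : σ), Inv P s → Inv (P ++ l) (l.foldl f s) := by
  induction l with
  | nil => intro P s h; simpa using h
  | cons a l ih =>
    intro P s h
    have h1 : Inv (P ++ [a]) (f s a) := step P a s (List.mem_cons_self ..) h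
    have := ih (fun P b s hb => step P b s (List.mem_cons_of_mem _ hb)) (P ++ [a]) (f s a) h1
    simpa [List.append_assoc] using this


-- ---- facts about scan orders, discovered components ----

lemma mem_pvPairsCM (land : List (List Int)) (c : Int × Int) :
    c ∈ pvPairsCM land ↔
      0 ≤ c.1 ∧ c.1 < (pvN land : Int) ∧ 0 ≤ c.2 ∧ c.2 < (pvM land : Int) := by
  rw [pvPairsCM]
  simp only [List.mem_flatMap, List.mem_map, List.mem_range]
  constructor
  · rintro ⟨j, hj, i, hi, rfl⟩
    simp only
    omega
  · rintro ⟨h1, h2, h3, h4⟩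
    refine ⟨c.2.toNat, by omega, c.1.toNat, by omega, ?_⟩
    rw [Prod.ext_iff]
    constructor <;> simp <;> omega

lemma mem_pvPairsRM (land : List (List Int)) (c : Int × Int) :
    c ∈ pvPairsRM land ↔
      0 ≤ c.1 ∧ c.1 < (pvN land : Int) ∧ 0 ≤ c.2 ∧ c.2 < (pvM land : Int) := by
  rw [pvPairsRM]
  simp only [List.mem_flatMap, List.mem_map, List.mem_range]
  constructor
  · rintro ⟨i, hi, j, hj, rfl⟩
    simp only
    omega
  · rintro ⟨h1, h2, h3, h4⟩
    refine ⟨c.1.toNat, by omega, c.2.toNat, by omega, ?_⟩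
    rw [Prod.ext_iff]
    constructor <;> simp <;> omega

lemma mem_pvDiscovered (land : List (List Int)) (P : List (Int × Int))
    (C : Finset (Int × Int)) :
    C ∈ pvDiscovered land P ↔ C ∈ pvComps land ∧ ∃ c ∈ C, c ∈ P := by
  simp only [pvDiscovered, Finset.mem_filter]

lemma mem_pvDisc (land : List (List Int)) (P : List (Int × Int)) (z : Int × Int) :
    z ∈ pvDisc land P ↔ ∃ C ∈ pvDiscovered land P, z ∈ C := by
  rw [pvDisc]
  rw [Finset.mem_sup]
  simp

lemma pvComp_mem_pvComps (land : List (List Int)) (a : Int × Int)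
    (h : pvLandB land a = true) : pvComp land a ∈ pvComps land :=
  Finset.mem_image_of_mem _ ((mem_pvCellsF land a).mpr h)

lemma pvComp_subset_cells (land : List (List Int)) (a : Int × Int) :
    pvComp land a ⊆ pvCellsF land := by
  intro z hz
  exact ((mem_pvCellsF land z).mpr ((mem_pvComp land a z).mp hz).1)

-- after a land cell not yet discovered is scanned, exactly its component is added
lemma pvDiscovered_append_new (land : List (List Int)) (P : List (Int × Int))
    (a : Int × Int) (hl : pvLandB land a = true) (hnd : a ∉ pvDisc land P) :
    pvDiscovered land (P ++ [a]) = insert (pvComp land a) (pvDiscovered land P) := by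
  ext C
  rw [mem_pvDiscovered, Finset.mem_insert, mem_pvDiscovered]
  constructor
  · rintro ⟨hC, c, hc, hcP⟩
    rcases List.mem_append.mp hcP with h | h
    · exact Or.inr ⟨hC, c, hc, h⟩
    · rw [List.mem_singleton] at h
      subst h
      left
      exact pvComp_eq_of_mem land hC hc
  · rintro (rfl | ⟨hC, c, hc, hcP⟩)
    · exact ⟨pvComp_mem_pvComps land a hl,
        a, self_mem_pvComp land a hl, List.mem_append_right _ (List.mem_singleton.mpr rfl)⟩
    · exact ⟨hC, c, hc, List.mem_append_left _ hcP⟩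

lemma pvDiscovered_append_old (land : List (List Int)) (P : List (Int × Int))
    (a : Int × Int) (h : pvLandB land a = false ∨ a ∈ pvDisc land P) :
    pvDiscovered land (P ++ [a]) = pvDiscovered land P := by
  ext C
  rw [mem_pvDiscovered, mem_pvDiscovered]
  constructor
  · rintro ⟨hC, c, hc, hcP⟩
    refine ⟨hC, ?_⟩
    rcases List.mem_append.mp hcP with hm | hm
    · exact ⟨c, hc, hm⟩
    · rw [List.mem_singleton] at hm
      subst hm
      rcases h with h | h
      · exfalso
        have : c ∈ pvCellsF land := pvComp_subset_cells land _ ((pvComp_eq_of_mem land hC hc) ▸ hc)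
        rw [mem_pvCellsF] at this
        rw [this] at h
        cases h
      · obtain ⟨C₀, hC₀, hcC₀⟩ := (mem_pvDisc land P c).mp h
        have h1 : C = pvComp land c := pvComp_eq_of_mem land hC hc
        have h2 : C₀ = pvComp land c :=
          pvComp_eq_of_mem land ((mem_pvDiscovered land P C₀).mp hC₀).1 hcC₀
        obtain ⟨_, c', hc', hc'P⟩ := (mem_pvDiscovered land P C₀).mp hC₀
        exact ⟨c', h1 ▸ h2 ▸ hc', hc'P⟩
  · rintro ⟨hC, c, hc, hcP⟩
    exact ⟨hC, c, hc, List.mem_append_left _ hcP⟩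

lemma pvDisc_append_new (land : List (List Int)) (P : List (Int × Int))
    (a : Int × Int) (hl : pvLandB land a = true) (hnd : a ∉ pvDisc land P) :
    pvDisc land (P ++ [a]) = pvDisc land P ∪ pvComp land a := by
  rw [pvDisc, pvDiscovered_append_new land P a hl hnd, Finset.sup_insert]
  rw [pvDisc, Finset.union_comm]
  rfl

-- ---- the outer scan of A ----

def pvInvA (land : List (List Int)) (P : List (Int × Int))
    (st : List (List Int) × List Int) : Prop :=
  st.1 = pvGridOf land (pvDisc land P) ∧ st.2.length = pvM land ∧
    ∀ col : Nat, st.2.getD col 0 =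
      (if col < pvM land then ∑ C ∈ pvDiscovered land P, pvContrib C (col : Int) else 0)

lemma pvInvA_step (land : List (List Int)) (hPre : Pre_solution land)
    (P : List (Int × Int)) (a : Int × Int) (ha : a ∈ pvPairsCM land)
    (st : List (List Int) × List Int) (h : pvInvA land P st) :
    pvInvA land (P ++ [a])
      (if pvGet2 land a.1 a.2 = 1 ∧ pvGet2 st.1 a.1 a.2 = 0 then
        (let r := pvBfs land (pvN land : Int) (pvM land : Int)
            (land.length * (land.headD []).length + 1) a.1 a.2 st.1 0 st.2
         (r.1, r.2.2))
      else st) := by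
  obtain ⟨h1, h2, h3⟩ := h
  obtain ⟨hb1, hb2, hb3, hb4⟩ := (mem_pvPairsCM land a).mp ha
  have hread : pvGet2 st.1 a.1 a.2 = (if a ∈ pvDisc land P then 1 else 0) := by
    rw [h1]
    exact pvGet2_gridOf land _ hb1 hb2 hb3 hb4
  by_cases hcond : pvGet2 land a.1 a.2 = 1 ∧ pvGet2 st.1 a.1 a.2 = 0
  · rw [if_pos hcond]
    have hland : pvLandB land a = true := by
      rw [pvLandB_iff]; exact ⟨hb1, hb2, hb3, hb4, hcond.1⟩
    have hnotin : a ∉ pvDisc land P := by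
      intro hmem
      have hcond2 := hcond.2
      rw [hread, if_pos hmem] at hcond2
      omega
    have hCland : ∀ c ∈ pvComp land a, pvLandB land c = true :=
      fun c hc => ((mem_pvComp land a c).mp hc).1
    have hCclosed : ∀ c ∈ pvComp land a, ∀ d, pvAdj land c d → d ∈ pvComp land a :=
      fun c hc d hd => pvComp_closed land hc hd
    have hCconn : ∀ c ∈ pvComp land a, ∀ d ∈ pvComp land a, pvConn land c d :=
      fun c hc d hd => pvComp_conn land hc hd
    have hself : a ∈ pvComp land a := self_mem_pvComp land a hland
    have hCS : ∀ c ∈ pvComp land a, c ∉ pvDisc land P := by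
      intro c hc hmem
      obtain ⟨C₀, hC₀, hcC₀⟩ := (mem_pvDisc land P c).mp hmem
      have h4 : C₀ = pvComp land c :=
        pvComp_eq_of_mem land ((mem_pvDiscovered land P C₀).mp hC₀).1 hcC₀
      have h5 : pvComp land a = pvComp land c :=
        pvComp_eq_of_conn land ((mem_pvComp land a c).mp hc).2
      have haC₀ : a ∈ C₀ := by
        rw [h4, ← h5]
        exact hself
      exact hnotin ((mem_pvDisc land P a).mpr ⟨C₀, hC₀, haC₀⟩)
    have hcard : (pvComp land a).card ≤ pvN land * pvM land :=
      le_trans (Finset.card_le_card (pvComp_subset_cells land a)) (pvCellsF_card_le land)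
    obtain ⟨p', hloop, hp'nd, hp'mem⟩ := pvBfsLoop_spec land (pvComp land a) (pvDisc land P)
      hCland hCclosed hCconn hCS
      (land.length * (land.headD []).length + 1) [a] {a} []
      ⟨a, Finset.mem_singleton_self a⟩ (Finset.singleton_subset_iff.mpr hself)
      (List.nodup_singleton a) (by simp)
      (by intro w hw hwQ; rw [Finset.mem_singleton] at hw; subst hw; simp at hwQ)
      List.nodup_nil
      (by intro col; simp)
      (by
        show (pvComp land a).card - ({a} : Finset (Int × Int)).card + ([a] : List (Int × Int)).length ≤ _
        rw [Finset.card_singleton, List.length_singleton]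
        have hNM : pvN land * pvM land = land.length * (land.headD []).length := rfl
        omega)
    have hbfs : pvBfs land (pvN land : Int) (pvM land : Int)
        (land.length * (land.headD []).length + 1) a.1 a.2 st.1 0 st.2
        = (pvGridOf land (pvDisc land P ∪ pvComp land a), ((pvComp land a).card : Int),
            p'.foldl (fun k o => pvAddAt k o ((pvComp land a).card : Int)) st.2) := by
      simp only [pvBfs]
      rw [h1, pvSet2_gridOf land _ hb1 hb2 hb3 hb4]
      have hins : insert (a.1, a.2) (pvDisc land P) = pvDisc land P ∪ {a} := by
        ext z
        rw [Finset.mem_insert, Finset.mem_union, Finset.mem_singleton]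
        tauto
      rw [hins]
      have hone : ((0 : Int) + 1) = (({a} : Finset (Int × Int)).card : Int) := by simp
      rw [hone, hloop]
    rw [hbfs]
    have hEnew : pvDiscovered land (P ++ [a])
        = insert (pvComp land a) (pvDiscovered land P) :=
      pvDiscovered_append_new land P a hland hnotin
    have hDnew : pvDisc land (P ++ [a]) = pvDisc land P ∪ pvComp land a :=
      pvDisc_append_new land P a hland hnotin
    have hCnotE : pvComp land a ∉ pvDiscovered land P := by
      intro hmem
      exact hnotin ((mem_pvDisc land P a).mpr ⟨pvComp land a, hmem, hself⟩)
    obtain ⟨hflen, hfval⟩ := pvFoldAdd ((pvComp land a).card : Int) p' st.2 hp'nd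
      (by
        intro o ho
        obtain ⟨c, hc, hcol⟩ := (hp'mem o).mp ho
        have := (pvLandB_iff land c).mp (hCland c hc)
        rw [h2]
        omega)
    refine ⟨by rw [hDnew], by rw [hflen, h2], ?_⟩
    intro col
    rw [hfval col, h3 col, hEnew, Finset.sum_insert hCnotE]
    by_cases hcm : col < pvM land
    · rw [if_pos hcm, if_pos hcm]
      rw [pvContrib]
      by_cases hex : ∃ x ∈ pvComp land a, x.2 = (col : Int)
      · rw [if_pos hex, if_pos]
        · ring
        · exact ⟨(hp'mem (col : Int)).mpr hex, by omega⟩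
      · rw [if_neg hex, if_neg]
        · ring
        · intro hcontr
          exact hex ((hp'mem (col : Int)).mp hcontr.1)
    · rw [if_neg hcm, if_neg hcm, if_neg]
      · ring
      · intro hcontr
        rw [h2] at hcontr
        omega
  · rw [if_neg hcond]
    have hold : pvDiscovered land (P ++ [a]) = pvDiscovered land P := by
      apply pvDiscovered_append_old
      by_cases hland : pvLandB land a = true
      · right
        by_contra hnm
        apply hcond
        refine ⟨((pvLandB_iff land a).mp hland).2.2.2.2, ?_⟩
        rw [hread, if_neg hnm]
      · left
        exact Bool.not_eq_true _ ▸ (by revert hland; cases pvLandB land a <;> simp)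
    refine ⟨?_, h2, ?_⟩
    · rw [h1, pvDisc, pvDisc, hold]
    · intro col
      rw [h3 col, hold]

lemma pvKA (land : List (List Int)) (hPre : Pre_solution land) :
    ∃ kA : List Int,
      solution land = (PySem.List.max? kA (fun x => x)).getD 0 ∧
      kA.length = pvM land ∧
      ∀ col : Nat, col < pvM land → kA.getD col 0 = pvKSpec land (col : Int) := by
  have hE : pvDiscovered land [] = ∅ := by
    ext C
    rw [mem_pvDiscovered]
    simp
  have hInv0 : pvInvA land [] (pvGridOf land ∅, List.replicate (pvM land) (0 : Int)) := by
    refine ⟨?_, by simp, ?_⟩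
    · show pvGridOf land ∅ = _
      rw [pvDisc, hE, Finset.sup_empty]
      rfl
    intro col
    rw [hE]
    simp only [Finset.sum_empty, ite_self]
    by_cases hc : col < pvM land
    · rw [List.getD_eq_getElem _ _ (by simpa using hc), List.getElem_replicate]
    · rw [List.getD_eq_default _ _ (by simpa using hc)]
  have hInvFin := pvFoldlInv _ (pvInvA land) (pvPairsCM land)
    (fun P c s hc hI => pvInvA_step land hPre P c hc s hI) [] _ hInv0
  rw [List.nil_append] at hInvFin
  have hfull : pvDiscovered land (pvPairsCM land) = pvComps land := by
    ext C
    rw [mem_pvDiscovered]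
    constructor
    · exact fun h => h.1
    · intro hC
      refine ⟨hC, ?_⟩
      obtain ⟨c₀, hc₀, rfl⟩ := Finset.mem_image.mp hC
      have hl : pvLandB land c₀ = true := (mem_pvCellsF land c₀).mp hc₀
      refine ⟨c₀, self_mem_pvComp land c₀ hl, ?_⟩
      rw [mem_pvPairsCM]
      have := (pvLandB_iff land c₀).mp hl
      tauto
  refine ⟨_, ?_, hInvFin.2.1, ?_⟩
  · show solution land = _
    simp only [solution]
    rw [pvGridOf_empty land]
    simp only [PySem.List.pyRange_zero_nat, List.foldl_map]
    rw [pvPairsCM, List.foldl_flatMap]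
    simp only [List.foldl_map]
    rfl
  · intro col hcol
    have := hInvFin.2.2 col
    rw [hfull, if_pos hcol] at this
    rw [this, pvKSpec]


lemma nodup_pvPairsRM (land : List (List Int)) : (pvPairsRM land).Nodup := by
  rw [pvPairsRM]
  apply List.nodup_flatMap.mpr
  constructor
  · intro i hi
    apply List.Nodup.map_on ?_ (List.nodup_range)
    intro x _ y _ hxy
    rw [Prod.ext_iff] at hxy
    have := hxy.2
    simp only at this
    exact_mod_cast this
  · apply List.Pairwise.imp ?_ (List.pairwise_lt_range)
    intro i i' hlt
    intro a ha ha'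
    obtain ⟨j, _, rfl⟩ := List.mem_map.mp ha
    obtain ⟨j', _, h⟩ := List.mem_map.mp ha'
    rw [Prod.ext_iff] at h
    have : (i' : Int) = (i : Int) := h.1
    omega

lemma mem_pvCellsRM (land : List (List Int)) (c : Int × Int) :
    c ∈ pvCellsRM land ↔ pvLandB land c = true := by
  rw [pvCellsRM, List.mem_filter]
  constructor
  · exact fun h => h.2
  · intro h
    refine ⟨?_, h⟩
    rw [mem_pvPairsRM]
    have := (pvLandB_iff land c).mp h
    tauto

lemma nodup_pvCellsRM (land : List (List Int)) : (pvCellsRM land).Nodup :=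
  List.Nodup.filter _ (nodup_pvPairsRM land)

lemma pvFoldlInsertIf (land : List (List Int)) :
    ∀ (l : List (Int × Int)) (d : PySem.Dict (Int × Int) (Int × Int)), l.Nodup →
      (∀ c ∈ l, pvGet2 land c.1 c.2 = 1 → d.contains c = false) →
      (l.foldl (fun d c => if pvGet2 land c.1 c.2 = 1 then d.insert c c else d) d).items
        = d.items ++ (l.filter (fun c => decide (pvGet2 land c.1 c.2 = 1))).map (fun c => (c, c)) := by
  intro l
  induction l with
  | nil => intro d _ _; simp
  | cons c l ih =>
    intro d hnd hfresh
    rw [List.foldl_cons]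
    by_cases hc : pvGet2 land c.1 c.2 = 1
    · rw [if_pos hc]
      have hfil : List.filter (fun c => decide (pvGet2 land c.1 c.2 = 1)) (c :: l)
          = c :: List.filter (fun c => decide (pvGet2 land c.1 c.2 = 1)) l := by
        simp [List.filter_cons, hc]
      rw [hfil]
      simp only [List.map_cons]
      rw [ih (d.insert c c) hnd.of_cons ?_]
      · rw [PySem.Dict.items_insert_of_not_contains d c (hfresh c (List.mem_cons_self ..) hc)]
        simp
      · intro c' hc' h1
        rw [PySem.Dict.contains_insert]
        have hne : c' ≠ c := by
          intro h; subst h; exact (List.nodup_cons.mp hnd).1 hc'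
        rw [hfresh c' (List.mem_cons_of_mem _ hc') h1]
        simp [hne]
    · rw [if_neg hc]
      have hfil : List.filter (fun c => decide (pvGet2 land c.1 c.2 = 1)) (c :: l)
          = List.filter (fun c => decide (pvGet2 land c.1 c.2 = 1)) l := by
        simp [List.filter_cons, hc]
      rw [hfil]
      exact ih d hnd.of_cons (fun c' hc' h1 => hfresh c' (List.mem_cons_of_mem _ hc') h1)

-- ---- B: the label dictionary ----

def pvEmits (u v : Int × Int) : Prop := v = (u.1 + 1, u.2) ∨ v = (u.1, u.2 + 1)

def pvInvB (land : List (List Int)) (P : List (Int × Int))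
    (lab : PySem.Dict (Int × Int) (Int × Int)) : Prop :=
  lab.keys = pvCellsRM land ∧
    (∀ cr ∈ lab.items, pvConn land cr.1 cr.2) ∧
    (∀ u v : Int × Int, u ∈ P → pvEmits u v →
      pvLandB land u = true → pvLandB land v = true → pvLookup lab u = pvLookup lab v)

lemma pvGet?_mk_map_val (l : List ((Int × Int) × (Int × Int))) (h : Int × Int → Int × Int)
    (u : Int × Int) :
    (PySem.Dict.mk (l.map (fun cr => (cr.1, h cr.2)))).get? u =
      ((PySem.Dict.mk l).get? u).map h := by
  induction l with
  | nil => rfl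
  | cons cr l ih =>
    simp only [List.map_cons]
    rw [PySem.Dict.get?_mk_cons, PySem.Dict.get?_mk_cons]
    by_cases hc : (cr.1 == u) = true
    · rw [if_pos hc, if_pos hc]; rfl
    · rw [if_neg hc, if_neg hc]; exact ih

lemma pvLookup_of_mem {lab : PySem.Dict (Int × Int) (Int × Int)} {c r : Int × Int}
    (hnd : lab.keys.Nodup) (h : (c, r) ∈ lab.items) : pvLookup lab c = r := by
  exact PySem.Dict.getD_of_mem_items lab h hnd (0, 0)


lemma pvGet?_eq_some_look (lab : PySem.Dict (Int × Int) (Int × Int)) (u : Int × Int)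
    (hu : u ∈ lab.keys) : lab.get? u = some (pvLookup lab u) := by
  have hc : lab.contains u = true := (PySem.Dict.contains_iff_mem_keys lab u).mpr hu
  rw [PySem.Dict.contains_eq_isSome_get?] at hc
  obtain ⟨v, hv⟩ := Option.isSome_iff_exists.mp hc
  rw [hv, pvLookup, PySem.Dict.getD_of_get?_eq_some _ _ hv]

lemma pvKeys_relabel (lab : PySem.Dict (Int × Int) (Int × Int)) (ra rb : Int × Int) :
    (PySem.Dict.mk (lab.items.map (fun cr => (cr.1, if cr.2 = rb then ra else cr.2)))).keys
      = lab.keys := by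
  show (lab.items.map (fun cr => (cr.1, if cr.2 = rb then ra else cr.2))).map (fun p => p.1)
    = lab.items.map (fun p => p.1)
  rw [List.map_map]
  rfl

lemma pvLookup_relabel (lab : PySem.Dict (Int × Int) (Int × Int)) (ra rb : Int × Int)
    (u : Int × Int) (hu : u ∈ lab.keys) :
    pvLookup (PySem.Dict.mk (lab.items.map (fun cr => (cr.1, if cr.2 = rb then ra else cr.2)))) u
      = (if pvLookup lab u = rb then ra else pvLookup lab u) := by
  rw [pvLookup, PySem.Dict.getD_eq_get?_getD,
    pvGet?_mk_map_val lab.items (fun r => if r = rb then ra else r) u,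
    pvGet?_eq_some_look lab u hu]
  rfl

lemma pvMerge_spec (land : List (List Int)) (c nb : Int × Int)
    (hc : pvLandB land c = true) (hemits : pvEmits c nb)
    (lab : PySem.Dict (Int × Int) (Int × Int))
    (hkeys : lab.keys = pvCellsRM land)
    (hconn : ∀ cr ∈ lab.items, pvConn land cr.1 cr.2) :
    (pvMerge land (pvN land : Int) (pvM land : Int) c lab nb).keys = pvCellsRM land ∧
    (∀ cr ∈ (pvMerge land (pvN land : Int) (pvM land : Int) c lab nb).items,
      pvConn land cr.1 cr.2) ∧
    (∀ u v : Int × Int, u ∈ lab.keys → v ∈ lab.keys → pvLookup lab u = pvLookup lab v →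
      pvLookup (pvMerge land (pvN land : Int) (pvM land : Int) c lab nb) u
        = pvLookup (pvMerge land (pvN land : Int) (pvM land : Int) c lab nb) v) ∧
    (pvLandB land nb = true →
      pvLookup (pvMerge land (pvN land : Int) (pvM land : Int) c lab nb) c
        = pvLookup (pvMerge land (pvN land : Int) (pvM land : Int) c lab nb) nb) := by
  by_cases hguard : nb.1 < (pvN land : Int) ∧ nb.2 < (pvM land : Int) ∧ pvGet2 land nb.1 nb.2 = 1
  · have hlnb : pvLandB land nb = true := by
      rw [pvLandB_iff]
      have := (pvLandB_iff land c).mp hc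
      rcases hemits with h | h <;> rw [h] <;> simp only <;>
        exact ⟨by omega, by rw [h] at hguard; exact hguard.1, by omega,
          by rw [h] at hguard; exact hguard.2.1, by rw [h] at hguard; exact hguard.2.2⟩
    have hcK : c ∈ lab.keys := by rw [hkeys, mem_pvCellsRM]; exact hc
    have hnbK : nb ∈ lab.keys := by rw [hkeys, mem_pvCellsRM]; exact hlnb
    have hadj : pvAdj land c nb := by
      refine ⟨hc, hlnb, ?_⟩
      rcases hemits with h | h <;> rw [h] <;> simp <;> omega
    have hconn_c : pvConn land c (pvLookup lab c) := by
      have := hconn (c, pvLookup lab c)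
        (PySem.Dict.mem_items_of_get?_eq_some lab (pvGet?_eq_some_look lab c hcK))
      exact this
    have hconn_nb : pvConn land nb (pvLookup lab nb) := by
      have := hconn (nb, pvLookup lab nb)
        (PySem.Dict.mem_items_of_get?_eq_some lab (pvGet?_eq_some_look lab nb hnbK))
      exact this
    rw [pvMerge]
    simp only [if_pos hguard]
    by_cases hne : pvLookup lab c ≠ pvLookup lab nb
    · rw [if_pos hne]
      set ra := pvLookup lab c with hra
      set rb := pvLookup lab nb with hrb
      have hconn_rb_ra : pvConn land rb ra :=
        Relation.ReflTransGen.trans (pvConn_symm hconn_nb)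
          (Relation.ReflTransGen.trans
            (Relation.ReflTransGen.single (pvAdj_symm land hadj)) hconn_c)
      have hkeys' := pvKeys_relabel lab ra rb
      refine ⟨by rw [hkeys', hkeys], ?_, ?_, ?_⟩
      · intro cr hcr
        obtain ⟨cr₀, hcr₀, rfl⟩ := List.mem_map.mp hcr
        simp only
        by_cases heq : cr₀.2 = rb
        · rw [if_pos heq]
          exact Relation.ReflTransGen.trans (heq ▸ hconn cr₀ hcr₀) hconn_rb_ra
        · rw [if_neg heq]
          exact hconn cr₀ hcr₀
      · intro u v hu hv heq
        rw [pvLookup_relabel lab ra rb u hu, pvLookup_relabel lab ra rb v hv, heq]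
      · intro _
        rw [pvLookup_relabel lab ra rb c hcK, pvLookup_relabel lab ra rb nb hnbK]
        rw [← hra, ← hrb, if_pos rfl, if_neg hne]
    · rw [if_neg hne]
      push Not at hne
      exact ⟨hkeys, hconn, fun u v _ _ h => h, fun _ => hne⟩
  · rw [pvMerge]
    simp only [if_neg hguard]
    refine ⟨hkeys, hconn, fun u v _ _ h => h, ?_⟩
    intro hlnb
    exfalso
    apply hguard
    have := (pvLandB_iff land nb).mp hlnb
    tauto

lemma pvInvB_step (land : List (List Int)) (P : List (Int × Int)) (a : Int × Int)
    (ha : a ∈ pvPairsRM land) (lab : PySem.Dict (Int × Int) (Int × Int))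
    (h : pvInvB land P lab) :
    pvInvB land (P ++ [a])
      (if pvGet2 land a.1 a.2 ≠ 1 then lab
       else [((a.1 + 1 : Int), a.2), (a.1, (a.2 + 1 : Int))].foldl
         (pvMerge land (pvN land : Int) (pvM land : Int) a) lab) := by
  obtain ⟨hb1, hb2, hb3, hb4⟩ := (mem_pvPairsRM land a).mp ha
  obtain ⟨hK1, hK2, hK3⟩ := h
  by_cases hl : pvGet2 land a.1 a.2 = 1
  · have hland : pvLandB land a = true := by
      rw [pvLandB_iff]; exact ⟨hb1, hb2, hb3, hb4, hl⟩
    rw [if_neg (by simpa using hl)]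
    rw [List.foldl_cons, List.foldl_cons, List.foldl_nil]
    have hkeys0 : lab.keys = pvCellsRM land := hK1
    have hem1 : pvEmits a ((a.1 + 1 : Int), a.2) := Or.inl rfl
    have hem2 : pvEmits a (a.1, (a.2 + 1 : Int)) := Or.inr rfl
    obtain ⟨hk1, hc1, hp1, he1⟩ := pvMerge_spec land a _ hland hem1 lab hkeys0 hK2
    set lab1 := pvMerge land (pvN land : Int) (pvM land : Int) a lab ((a.1 + 1 : Int), a.2)
      with hlab1
    obtain ⟨hk2, hc2, hp2, he2⟩ := pvMerge_spec land a _ hland hem2 lab1 hk1 hc1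
    set lab2 := pvMerge land (pvN land : Int) (pvM land : Int) a lab1 (a.1, (a.2 + 1 : Int))
      with hlab2
    have hkmem : ∀ u : Int × Int, pvLandB land u = true → u ∈ lab.keys := by
      intro u hu; rw [hkeys0, mem_pvCellsRM]; exact hu
    have hkmem1 : ∀ u : Int × Int, pvLandB land u = true → u ∈ lab1.keys := by
      intro u hu; rw [hk1, mem_pvCellsRM]; exact hu
    refine ⟨hk2, hc2, ?_⟩
    intro u v hu hem hlu hlv
    rcases List.mem_append.mp hu with huP | hua
    · -- an edge merged earlier keeps equal labels
      exact hp2 u v (hkmem1 u hlu) (hkmem1 v hlv)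
        (hp1 u v (hkmem u hlu) (hkmem v hlv) (hK3 u v huP hem hlu hlv))
    · rw [List.mem_singleton] at hua
      subst hua
      rcases hem with hv | hv
      · subst hv
        exact hp2 _ _ (hkmem1 u hlu) (hkmem1 _ hlv) (he1 hlv)
      · subst hv
        exact he2 hlv
  · rw [if_pos (by simpa using hl)]
    refine ⟨hK1, hK2, ?_⟩
    intro u v hu hem hlu hlv
    rcases List.mem_append.mp hu with huP | hua
    · exact hK3 u v huP hem hlu hlv
    · rw [List.mem_singleton] at hua
      subst hua
      exfalso
      exact hl ((pvLandB_iff land u).mp hlu).2.2.2.2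

lemma pvInvB_final (land : List (List Int)) (lab : PySem.Dict (Int × Int) (Int × Int))
    (h : pvInvB land (pvPairsRM land) lab) {u v : Int × Int}
    (huv : pvConn land u v) : pvLookup lab u = pvLookup lab v := by
  obtain ⟨hK1, hK2, hK3⟩ := h
  have hadj : ∀ b d : Int × Int, pvAdj land b d → pvLookup lab b = pvLookup lab d := by
    intro b d hbd
    obtain ⟨hlb, hld, hnat⟩ := hbd
    have hbP : pvLandB land b = true → b ∈ pvPairsRM land := by
      intro hl
      rw [mem_pvPairsRM]
      have := (pvLandB_iff land b).mp hl
      tauto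
    have hdP : pvLandB land d = true → d ∈ pvPairsRM land := by
      intro hl
      rw [mem_pvPairsRM]
      have := (pvLandB_iff land d).mp hl
      tauto
    rcases pvAdj_cases hnat with hd | hd | hd | hd
    · exact hK3 b d (hbP hlb) (Or.inr hd) hlb hld
    · refine (hK3 d b (hdP hld) (Or.inr ?_) hld hlb).symm
      rw [hd, Prod.ext_iff]
      constructor <;> simp <;> omega
    · exact hK3 b d (hbP hlb) (Or.inl hd) hlb hld
    · refine (hK3 d b (hdP hld) (Or.inl ?_) hld hlb).symm
      rw [hd, Prod.ext_iff]
      constructor <;> simp <;> omega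
  induction huv with
  | refl => rfl
  | tail hconn hstep ih => exact ih.trans (hadj _ _ hstep)


-- ---- B: grouping and the k loop ----

lemma pvClassesFold (land : List (List Int)) (L : List (List (Int × Int))) : ∀ (k : List Int),
    k.length = pvM land →
    (∀ cls ∈ L, cls.Nodup ∧ ∀ c ∈ cls, pvLandB land c = true) →
    (L.foldl (fun k cells => (PySem.Set.ofList (cells.map (fun c => c.2))).foldl
        (fun k col => pvAddAt k col (cells.length : Int)) k) k).length = pvM land ∧
    ∀ col : Nat,
      (L.foldl (fun k cells => (PySem.Set.ofList (cells.map (fun c => c.2))).foldl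
        (fun k col => pvAddAt k col (cells.length : Int)) k) k).getD col 0
      = k.getD col 0 + (if col < pvM land then
          (L.map (fun cls => pvContrib cls.toFinset (col : Int))).sum else 0) := by
  induction L with
  | nil => intro k hk _; simp [hk]
  | cons cls L ih =>
    intro k hk hcls
    obtain ⟨hnd, hland⟩ := hcls cls (List.mem_cons_self ..)
    have hbd : ∀ o ∈ PySem.Set.ofList (cls.map (fun c => c.2)), 0 ≤ o ∧ o < (k.length : Int) := by
      intro o ho
      rw [PySem.Set.mem_ofList] at ho
      obtain ⟨c, hc, rfl⟩ := List.mem_map.mp ho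
      have := (pvLandB_iff land c).mp (hland c hc)
      rw [hk]
      omega
    obtain ⟨hflen, hfval⟩ := pvFoldAdd (cls.length : Int) _ k (PySem.Set.nodup_ofList _) hbd
    rw [List.foldl_cons]
    obtain ⟨ihlen, ihval⟩ := ih _ (by rw [hflen, hk])
      (fun cls' h => hcls cls' (List.mem_cons_of_mem _ h))
    refine ⟨ihlen, ?_⟩
    intro col
    rw [ihval col, hfval col, List.map_cons, List.sum_cons]
    have hcond : ((col : Int) ∈ PySem.Set.ofList (cls.map (fun c => c.2)))
        ↔ ∃ x ∈ cls.toFinset, x.2 = (col : Int) := by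
      rw [PySem.Set.mem_ofList]
      constructor
      · intro h
        obtain ⟨c, hc, hcc⟩ := List.mem_map.mp h
        exact ⟨c, List.mem_toFinset.mpr hc, hcc⟩
      · rintro ⟨c, hc, hcc⟩
        exact List.mem_map.mpr ⟨c, List.mem_toFinset.mp hc, hcc⟩
    have hcard : cls.toFinset.card = cls.length := List.toFinset_card_of_nodup hnd
    rw [pvContrib, hk]
    by_cases hcm : col < pvM land
    · rw [if_pos hcm, if_pos hcm]
      by_cases hex : ∃ x ∈ cls.toFinset, x.2 = (col : Int)
      · rw [if_pos hex, if_pos ⟨hcond.mpr hex, hcm⟩, hcard]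
        ring
      · rw [if_neg hex, if_neg (fun hcontr => hex (hcond.mp hcontr.1))]
        ring
    · rw [if_neg hcm, if_neg hcm, if_neg (fun hcontr => hcm hcontr.2)]
      ring

lemma pvClassList_mem (land : List (List Int)) (lab : PySem.Dict (Int × Int) (Int × Int))
    (hinv : pvInvB land (pvPairsRM land) lab) (r : Int × Int) (d : Int × Int) :
    d ∈ (lab.items.filter (fun cr => cr.2 == r)).map (fun cr => cr.1)
      ↔ d ∈ lab.keys ∧ pvLookup lab d = r := by
  have hndk : lab.keys.Nodup := hinv.1 ▸ nodup_pvCellsRM land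
  constructor
  · intro h
    obtain ⟨cr, hcr, rfl⟩ := List.mem_map.mp h
    rw [List.mem_filter] at hcr
    have : pvLookup lab cr.1 = cr.2 := pvLookup_of_mem hndk (by
      have : (cr.1, cr.2) = cr := rfl
      rw [this]
      exact hcr.1)
    refine ⟨?_, by rw [this]; exact beq_iff_eq.mp hcr.2⟩
    show cr.1 ∈ lab.items.map (fun p => p.1)
    exact List.mem_map.mpr ⟨cr, hcr.1, rfl⟩
  · rintro ⟨hd, hr⟩
    apply List.mem_map.mpr
    refine ⟨(d, r), ?_, rfl⟩
    rw [List.mem_filter]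
    refine ⟨?_, by simp⟩
    rw [← hr]
    exact PySem.Dict.mem_items_of_get?_eq_some lab (pvGet?_eq_some_look lab d hd)

lemma pvClassList_eq_comp (land : List (List Int)) (lab : PySem.Dict (Int × Int) (Int × Int))
    (hinv : pvInvB land (pvPairsRM land) lab) (c₀ r : Int × Int)
    (hc₀ : c₀ ∈ lab.keys) (hr : pvLookup lab c₀ = r) :
    ((lab.items.filter (fun cr => cr.2 == r)).map (fun cr => cr.1)).toFinset
      = pvComp land c₀ := by
  have hndk : lab.keys.Nodup := hinv.1 ▸ nodup_pvCellsRM land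
  have hkland : ∀ u : Int × Int, u ∈ lab.keys ↔ pvLandB land u = true := by
    intro u
    rw [hinv.1, mem_pvCellsRM]
  have hconn_look : ∀ u : Int × Int, u ∈ lab.keys → pvConn land u (pvLookup lab u) := by
    intro u hu
    exact hinv.2.1 (u, pvLookup lab u)
      (PySem.Dict.mem_items_of_get?_eq_some lab (pvGet?_eq_some_look lab u hu))
  ext d
  rw [List.mem_toFinset, pvClassList_mem land lab hinv, mem_pvComp]
  constructor
  · rintro ⟨hd, hld⟩
    refine ⟨(hkland d).mp hd, ?_⟩
    exact Relation.ReflTransGen.trans (hr ▸ hconn_look c₀ hc₀)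
      (pvConn_symm (hld ▸ hconn_look d hd))
  · rintro ⟨hld, hcd⟩
    have hdk : d ∈ lab.keys := (hkland d).mpr hld
    refine ⟨hdk, ?_⟩
    rw [← pvInvB_final land lab hinv hcd, hr]


lemma pvLabel0_items (land : List (List Int)) :
    ((pvPairsRM land).foldl (fun d (c : Int × Int) =>
        if pvGet2 land c.1 c.2 = 1 then d.insert c c else d) PySem.Dict.empty).items
      = (pvCellsRM land).map (fun c => (c, c)) := by
  rw [pvFoldlInsertIf land (pvPairsRM land) PySem.Dict.empty (nodup_pvPairsRM land)
    (by intro c _ _; simp)]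
  rw [pvCellsRM]
  have : List.filter (fun c : Int × Int => decide (pvGet2 land c.1 c.2 = 1)) (pvPairsRM land)
      = List.filter (fun c => pvLandB land c) (pvPairsRM land) := by
    apply List.filter_congr
    intro c hc
    obtain ⟨h1, h2, h3, h4⟩ := (mem_pvPairsRM land c).mp hc
    rw [pvLandB]
    apply decide_eq_decide.mpr
    constructor
    · intro h; exact ⟨h1, h2, h3, h4, h⟩
    · tauto
  rw [this]
  rw [show PySem.Dict.empty.items = ([] : List ((Int × Int) × (Int × Int))) from rfl]
  simp

lemma pvLabelFinal_inv (land : List (List Int)) :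
    pvInvB land (pvPairsRM land)
      ((pvPairsRM land).foldl (fun lab (c : Int × Int) =>
        if pvGet2 land c.1 c.2 ≠ 1 then lab
        else [((c.1 + 1 : Int), c.2), (c.1, (c.2 + 1 : Int))].foldl
          (pvMerge land (pvN land : Int) (pvM land : Int) c) lab)
      ((pvPairsRM land).foldl (fun d (c : Int × Int) =>
        if pvGet2 land c.1 c.2 = 1 then d.insert c c else d) PySem.Dict.empty)) := by
  have h0 : pvInvB land []
      ((pvPairsRM land).foldl (fun d (c : Int × Int) =>
        if pvGet2 land c.1 c.2 = 1 then d.insert c c else d) PySem.Dict.empty) := by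
    refine ⟨?_, ?_, ?_⟩
    · show (((pvPairsRM land).foldl _ PySem.Dict.empty).items).map _ = _
      rw [pvLabel0_items, List.map_map]
      exact List.map_id _
    · intro cr hcr
      rw [pvLabel0_items] at hcr
      obtain ⟨c, _, rfl⟩ := List.mem_map.mp hcr
      exact Relation.ReflTransGen.refl
    · intro u v hu
      cases hu
  have := pvFoldlInv _ (pvInvB land) (pvPairsRM land)
    (fun P c lab hc hI => pvInvB_step land P c hc lab hI) [] _ h0
  rw [List.nil_append] at this
  exact this

lemma pvKB (land : List (List Int)) (hPre : Pre_solution land) :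
    ∃ kB : List Int,
      solution_alt land = (PySem.List.max? kB (fun x => x)).getD 0 ∧
      kB.length = pvM land ∧
      ∀ col : Nat, col < pvM land → kB.getD col 0 = pvKSpec land (col : Int) := by
  have hinv := pvLabelFinal_inv land
  set lab := (pvPairsRM land).foldl (fun lab (c : Int × Int) =>
      if pvGet2 land c.1 c.2 ≠ 1 then lab
      else [((c.1 + 1 : Int), c.2), (c.1, (c.2 + 1 : Int))].foldl
        (pvMerge land (pvN land : Int) (pvM land : Int) c) lab)
    ((pvPairsRM land).foldl (fun d (c : Int × Int) =>
      if pvGet2 land c.1 c.2 = 1 then d.insert c c else d) PySem.Dict.empty) with hlab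
  set groups := lab.items.foldl (fun g cr => g.modify cr.2 [] (fun x => x ++ [cr.1]))
    PySem.Dict.empty with hgroups
  have hndk : lab.keys.Nodup := hinv.1 ▸ nodup_pvCellsRM land
  -- groups: keys, values
  have hgkeys : groups.keys = PySem.Set.ofList (lab.items.map (fun cr => cr.2)) := by
    rw [hgroups, PySem.Dict.keys_foldl_modify_key lab.items (fun cr => cr.2) []
      (fun d cr => (fun x => x ++ [cr.1]))]
    rw [PySem.Dict.keys_empty, PySem.Set.update_nil_left]
  have hgnd : groups.keys.Nodup := by
    rw [hgkeys]
    exact PySem.Set.nodup_ofList _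
  have hswap : groups = (lab.items.map Prod.swap).foldl
      (fun d p => d.modify p.1 [] (fun x => x ++ [p.2])) PySem.Dict.empty := by
    rw [List.foldl_map]
    rfl
  have hgetD : ∀ r : Int × Int, groups.getD r []
      = (lab.items.filter (fun cr => cr.2 == r)).map (fun cr => cr.1) := by
    intro r
    rw [hswap, PySem.Dict.getD_foldl_modify_append, PySem.Dict.getD_empty]
    rw [List.filter_map, List.map_map]
    rfl
  have hvalues : groups.values = (PySem.Set.ofList (lab.items.map (fun cr => cr.2))).map
      (fun r => (lab.items.filter (fun cr => cr.2 == r)).map (fun cr => cr.1)) := by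
    rw [PySem.Dict.values_eq_map_keys groups hgnd [], hgkeys]
    apply List.map_congr_left
    intro r _
    exact hgetD r
  -- every value is a component's cell list
  have hcls : ∀ cls ∈ groups.values, cls.Nodup ∧ ∀ c ∈ cls, pvLandB land c = true := by
    intro cls hclsm
    rw [hvalues] at hclsm
    obtain ⟨r, _, rfl⟩ := List.mem_map.mp hclsm
    constructor
    · apply List.Nodup.sublist ?_ hndk
      exact List.Sublist.map _ List.filter_sublist
    · intro c hcm
      have := (pvClassList_mem land lab hinv r c).mp hcm
      exact (hinv.1 ▸ (mem_pvCellsRM land c)).mp this.1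
  obtain ⟨hklen, hkval⟩ := pvClassesFold land groups.values
    (List.replicate (pvM land) (0 : Int)) (by simp) hcls
  -- the class finsets enumerate the components
  have hmemM : ∀ C : Finset (Int × Int),
      C ∈ (groups.values.map (fun cls => cls.toFinset)) ↔ C ∈ pvComps land := by
    intro C
    rw [hvalues, List.map_map]
    constructor
    · intro h
      obtain ⟨r, hr, rfl⟩ := List.mem_map.mp h
      rw [PySem.Set.mem_ofList] at hr
      obtain ⟨cr, hcr, rfl⟩ := List.mem_map.mp hr
      have hc₀k : cr.1 ∈ lab.keys := List.mem_map.mpr ⟨cr, hcr, rfl⟩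
      have hlook : pvLookup lab cr.1 = cr.2 := pvLookup_of_mem hndk (by
        show (cr.1, cr.2) ∈ lab.items
        have : (cr.1, cr.2) = cr := rfl
        rw [this]; exact hcr)
      show ((lab.items.filter _).map _).toFinset ∈ _
      rw [pvClassList_eq_comp land lab hinv cr.1 cr.2 hc₀k hlook]
      exact pvComp_mem_pvComps land cr.1 ((hinv.1 ▸ mem_pvCellsRM land cr.1).mp hc₀k)
    · intro hC
      obtain ⟨c, hcc, rfl⟩ := Finset.mem_image.mp hC
      have hl : pvLandB land c = true := (mem_pvCellsF land c).mp hcc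
      have hck : c ∈ lab.keys := (hinv.1 ▸ mem_pvCellsRM land c).mpr hl
      apply List.mem_map.mpr
      refine ⟨pvLookup lab c, ?_, ?_⟩
      · rw [PySem.Set.mem_ofList]
        apply List.mem_map.mpr
        exact ⟨(c, pvLookup lab c),
          PySem.Dict.mem_items_of_get?_eq_some lab (pvGet?_eq_some_look lab c hck), rfl⟩
      · exact pvClassList_eq_comp land lab hinv c (pvLookup lab c) hck rfl
  have hMnd : (groups.values.map (fun cls => cls.toFinset)).Nodup := by
    rw [hvalues, List.map_map]
    apply List.Nodup.map_on ?_ (PySem.Set.nodup_ofList _)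
    intro r hr r' hr' heq
    simp only [Function.comp_apply] at heq
    rw [PySem.Set.mem_ofList] at hr
    obtain ⟨cr, hcr, rfl⟩ := List.mem_map.mp hr
    have hc₀k : cr.1 ∈ lab.keys := List.mem_map.mpr ⟨cr, hcr, rfl⟩
    have hlook : pvLookup lab cr.1 = cr.2 := pvLookup_of_mem hndk (by
      show (cr.1, cr.2) ∈ lab.items
      have : (cr.1, cr.2) = cr := rfl
      rw [this]; exact hcr)
    have hm : cr.1 ∈ (lab.items.filter (fun p => p.2 == cr.2)).map (fun p => p.1) :=
      (pvClassList_mem land lab hinv cr.2 cr.1).mpr ⟨hc₀k, hlook⟩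
    have hm' : cr.1 ∈ (lab.items.filter (fun p => p.2 == r')).map (fun p => p.1) := by
      rw [← List.mem_toFinset, ← heq, List.mem_toFinset]
      exact hm
    have := (pvClassList_mem land lab hinv r' cr.1).mp hm'
    rw [← this.2, hlook]
  have hsum : ∀ col : Int,
      (groups.values.map (fun cls => pvContrib cls.toFinset col)).sum
        = pvKSpec land col := by
    intro col
    have h1 : groups.values.map (fun cls => pvContrib cls.toFinset col)
        = (groups.values.map (fun cls => cls.toFinset)).map (fun C => pvContrib C col) := by
      rw [List.map_map]
      rfl
    rw [h1, ← List.sum_toFinset _ hMnd]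
    rw [pvKSpec]
    apply Finset.sum_congr ?_ (fun _ _ => rfl)
    ext C
    rw [List.mem_toFinset]
    exact hmemM C
  refine ⟨_, ?_, hklen, ?_⟩
  · show solution_alt land = _
    rw [hgroups, hlab]
    simp only [solution_alt]
    simp only [PySem.List.pyRange_zero_nat, List.foldl_map]
    rw [pvPairsRM]
    simp only [List.foldl_flatMap]
    simp only [List.foldl_map]
    rfl
  · intro col hcol
    rw [hkval col, if_pos hcol, hsum (col : Int)]
    have : (List.replicate (pvM land) (0 : Int)).getD col 0 = 0 := by
      rw [List.getD_eq_getElem _ _ (by simpa using hcol), List.getElem_replicate]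
    rw [this, zero_add]

-- ===== VERDICT (by name: the statement is the Claim_ definition above) =====
theorem solution_spec : Claim_equal_solution := by
  intro land hDom hPre
  unfold Spec_solution
  obtain ⟨kA, hA, hlA, hvA⟩ := pvKA land hPre
  obtain ⟨kB, hB, hlB, hvB⟩ := pvKB land hPre
  have : kA = kB := by
    apply List.ext_getElem (by omega)
    intro i h1 h2
    have := hvA i (by omega)
    have := hvB i (by omega)
    rw [List.getD_eq_getElem _ _ h1] at *
    rw [List.getD_eq_getElem _ _ h2] at *
    omega
  rw [hA, hB, this]
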